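-- pv_equiv track=rewrite | github.com/wangsun39/leetcode | allcode/3800-3899/3806maximumAND.py | maximumAND
-- ===== SOURCE A (Python) =====
-- from typing import List
--
-- def maximumAND(nums: List[int], k: int, m: int) -> int:
--     ans = 0
--     for b in range(30, -1, -1):
--         target = ans | (1 << b)
--         costs = []
--
--         for x in nums:
--             if (x & target) == target:
--                 costs.append(0)
--                 continue
--
--             if x > target:
--                 bt = list(bin(target)[2:])
--                 bx = list(bin(x)[2:])
--                 bx = bx[-len(bt):]
--                 for i in range(len(bt)):
--                     if bt[i] == '0' and bx[i] == '1':
--                         bx[i] = '0'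
--                     elif bt[i] == '1' and bx[i] == '0':
--                         break
--                 x = int(''.join(bx), 2)
--
--             cost = target - x
--             costs.append(cost)
--
--         if len(costs) >= m:
--             costs.sort()
--             if sum(costs[:m]) <= k:
--                 ans = target
--
--     return ans
-- ===== SOURCE B (Python) =====
-- from typing import List
--
-- def _spot(best, c):
--     # binary search: leftmost position in the sorted buffer whose element is >= c
--     lo, hi = 0, len(best)
--     while lo < hi:
--         mid = (lo + hi) // 2
--         if best[mid] < c:
--             lo = mid + 1
--         else:
--             hi = mid
--     return lo
--
-- def maximumAND(nums: List[int], k: int, m: int) -> int: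
--     if m > len(nums):
--         return 0
--     ans = 0
--     for b in range(30, -1, -1):
--         target = ans | (1 << b)
--         best = []            # sorted buffer: the m smallest costs seen so far
--         for x in nums:
--             if x & target == target:
--                 c = 0
--             elif x <= target:
--                 c = target - x
--             else:
--                 d = target - (target & x)     # target bits missing from x
--                 p = d.bit_length() - 1        # highest missing bit
--                 c = target - (((x & target) >> (p + 1) << (p + 1)) | (x & ((1 << p) - 1)))
--             if len(best) == m and best and best[-1] <= c:
--                 continue                      # buffer full and c is no improvement
--             best.insert(_spot(best, c), c)
--             if len(best) > m:
--                 best.pop()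
--         if sum(best) <= k:
--             ans = target
--     return ans
-- ===== Notes on version B (the rewrite author's own statement) =====
-- stated objective: alternative
-- what changed: B fuses cost computation and selection into one pass that maintains a bounded sorted buffer of the m smallest costs (binary-search insert, skip when no improvement) instead of A's build-list/sort/slice, and computes each cost by closed-form bit arithmetic instead of A's binary-string editing.
-- outside the precondition, e.g. on maximumAND([102, 96, 8, 142], 92, -2): A returns 168, B returns 2147483647
import Mathlib
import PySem

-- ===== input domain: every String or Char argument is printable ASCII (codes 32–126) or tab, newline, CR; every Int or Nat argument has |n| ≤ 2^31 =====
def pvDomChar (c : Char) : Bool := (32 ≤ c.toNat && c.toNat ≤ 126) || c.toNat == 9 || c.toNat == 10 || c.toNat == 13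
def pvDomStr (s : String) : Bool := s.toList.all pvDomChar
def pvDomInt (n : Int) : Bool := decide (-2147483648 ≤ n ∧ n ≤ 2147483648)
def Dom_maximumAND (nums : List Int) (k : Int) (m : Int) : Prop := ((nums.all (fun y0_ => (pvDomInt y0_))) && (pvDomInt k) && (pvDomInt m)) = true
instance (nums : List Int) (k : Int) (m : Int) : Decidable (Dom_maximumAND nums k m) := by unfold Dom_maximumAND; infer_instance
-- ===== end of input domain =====

-- B fuses cost computation and selection into one pass keeping a bounded sorted buffer of the
-- m smallest costs (no costs list, no sort), with closed-form bit arithmetic for each cost.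

-- ===== PORT A =====

-- bin(n)[2:] for n ≥ 0 (A only calls it on positive ints, where bin() has no '-' sign)
def binChars (n : Nat) : List Char :=
  if n < 2 then [if n = 1 then '1' else '0']
  else binChars (n / 2) ++ [if n % 2 = 1 then '1' else '0']
decreasing_by exact Nat.div_lt_self (by omega) (by omega)

-- int(''.join(l), 2); exact on the '0'/'1'-only strings this code builds
def parseBin (l : List Char) : Nat :=
  l.foldl (fun a c => 2 * a + (if c = '1' then 1 else 0)) 0

-- A's inner `for i in range(len(bt))` over the two char lists, with its in-place edit and break
def fixLoop : List Char → List Char → List Char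
  | [], bx => bx
  | _ :: _, [] => []
  | t :: ts, c :: cs =>
    if t = '0' ∧ c = '1' then '0' :: fixLoop ts cs
    else if t = '1' ∧ c = '0' then c :: cs
    else c :: fixLoop ts cs

-- body of A's `for x in nums` loop: the cost appended for one x
def costA (target x : Int) : Int :=
  if PySem.Int.band x target = target then 0
  else
    let x' :=
      if target < x then
        let bt := binChars target.toNat
        let bx := binChars x.toNat   -- here x > target ≥ 1
        let bx1 := PySem.List.slice bx (some (-(bt.length : Int))) none
        let bx2 := fixLoop bt bx1
        ((parseBin bx2 : Nat) : Int)
      else x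
    target - x'

def costsA (target : Int) : List Int → List Int
  | [] => []
  | x :: xs => costA target x :: costsA target xs

-- body of A's `for b in range(30, -1, -1)` loop
def stepA (nums : List Int) (k m : Int) (ans b : Int) : Int :=
  let target := PySem.Int.bor ans (1 <<< b.toNat)   -- b ∈ [0,30] here, so toNat is exact
  let costs := costsA target nums
  if (costs.length : Int) ≥ m then
    if ((PySem.List.slice (PySem.List.sorted costs (fun c => c) false) none (some m)).sum) ≤ k
    then target else ans
  else ans

def maximumAND (nums : List Int) (k : Int) (m : Int) : Int :=
  (PySem.List.pyRange 30 (-1) (-1)).foldl (stepA nums k m) 0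

-- ===== PORT B =====

-- the conditional cost expression of Source B's inner loop (closed-form bit arithmetic)
def costB (target x : Int) : Int :=
  if PySem.Int.band x target = target then 0
  else if x ≤ target then target - x
  else
    let d := target - PySem.Int.band target x
    let p := PySem.Int.bitLength d - 1
    target - PySem.Int.bor (((PySem.Int.band x target) >>> (p + 1)) <<< (p + 1))
                           (PySem.Int.band x ((1 <<< p) - 1))

-- Source B's _spot: binary search for the leftmost buffer position whose element is ≥ c
-- (lo, hi are nonnegative Python ints, so Nat is exact; best[mid] always has lo ≤ mid < hi ≤ len)
def spotLoop (best : List Int) (c : Int) (lo hi : Nat) : Nat :=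
  if lo < hi then
    let mid := (lo + hi) / 2
    if best.getD mid 0 < c then spotLoop best c (mid + 1) hi
    else spotLoop best c lo mid
  else lo
termination_by hi - lo
decreasing_by all_goals omega

-- body of Source B's `for x in nums` loop: skip if no improvement, else insert and trim to m entries
def innerB (target m : Int) (best : List Int) (x : Int) : List Int :=
  let c := costB target x
  if (best.length : Int) = m ∧ best ≠ [] ∧ best.getLastD 0 ≤ c then best
  else
    let l := best.insertIdx (spotLoop best c 0 best.length) c
    if m < (l.length : Int) then l.dropLast else l

-- body of Source B's `for b in range(30, -1, -1)` loop
def stepB (nums : List Int) (k m : Int) (ans b : Int) : Int :=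
  let target := PySem.Int.bor ans (1 <<< b.toNat)
  if (nums.foldl (innerB target m) []).sum ≤ k then target else ans

def maximumAND_alt (nums : List Int) (k : Int) (m : Int) : Int :=
  if (nums.length : Int) < m then 0
  else (PySem.List.pyRange 30 (-1) (-1)).foldl (stepB nums k m) 0

-- ===== PRECONDITION & SPEC =====
-- Pre_ restricts m to nonnegative counts, the task's natural domain; for m < 0 (a meaningless
-- "choose at most m numbers") A's value comes from Python's negative slice costs[:m], an artefact.
def Pre_maximumAND (nums : List Int) (k : Int) (m : Int) : Prop := 0 ≤ m
instance (nums : List Int) (k : Int) (m : Int) : Decidable (Pre_maximumAND nums k m) := by unfold Pre_maximumAND; infer_instance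
def pvWitness_maximumAND : List Int × Int × Int := ([1, 2], 1, 1)

def Spec_maximumAND (nums : List Int) (k : Int) (m : Int) (out : Int) : Prop := out = maximumAND_alt nums k m
instance (nums : List Int) (k : Int) (m : Int) (out : Int) : Decidable (Spec_maximumAND nums k m out) := by unfold Spec_maximumAND; infer_instance

-- ===== CLAIM (what is proved, stated in full; the proofs are below) =====
def Claim_equal_maximumAND : Prop := ∀ (nums : List Int) (k : Int) (m : Int), Dom_maximumAND nums k m → Pre_maximumAND nums k m → Spec_maximumAND nums k m (maximumAND nums k m)

-- ===== LEMMAS AND PROOFS =====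

-- all chars are '0'/'1'
def IsBin (l : List Char) : Prop := ∀ c ∈ l, c = '0' ∨ c = '1'

theorem testBit_split (u a n i : Nat) (ha : a < 2^n) :
    (u * 2^n + a).testBit i = if i < n then a.testBit i else u.testBit (i - n) := by
  rcases Nat.lt_or_ge i n with h | h
  · rw [if_pos h]
    have h1 : (u * 2^n + a) % 2^n = a := by
      rw [Nat.mul_add_mod', Nat.mod_eq_of_lt ha]
    have := Nat.testBit_mod_two_pow (u * 2^n + a) n i
    rw [h1] at this
    simp [h] at this
    exact this.symm
  · rw [if_neg (Nat.not_lt.mpr h)]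
    have h2 : (u * 2^n + a) / 2^n = u := by
      rw [Nat.mul_comm, Nat.mul_add_div (Nat.two_pow_pos n), Nat.div_eq_of_lt ha, Nat.add_zero]
    have := Nat.testBit_div_two_pow (n := n) (u * 2^n + a) (i - n)
    rw [h2, Nat.sub_add_cancel h] at this
    exact this.symm

theorem land_split (u v a b n : Nat) (ha : a < 2^n) (hb : b < 2^n) :
    (u * 2^n + a) &&& (v * 2^n + b) = (u &&& v) * 2^n + (a &&& b) := by
  apply Nat.eq_of_testBit_eq
  intro i
  have hab : a &&& b < 2^n := Nat.lt_of_le_of_lt Nat.and_le_left ha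
  rw [Nat.testBit_land, testBit_split u a n i ha, testBit_split v b n i hb,
      testBit_split (u &&& v) (a &&& b) n i hab]
  split_ifs <;> simp

theorem lor_eq_add_of_lt (q b n : Nat) (hb : b < 2^n) :
    (q * 2^n) ||| b = q * 2^n + b := by
  apply Nat.eq_of_testBit_eq
  intro i
  have h0 : (0:Nat) < 2^n := Nat.two_pow_pos n
  have hq : (q * 2^n).testBit i = if i < n then false else q.testBit (i - n) := by
    have := testBit_split q 0 n i h0
    simpa using this
  rw [Nat.testBit_lor, hq, testBit_split q b n i hb]
  split_ifs with h
  · simp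
  · have : b.testBit i = false :=
      Nat.testBit_eq_false_of_lt (Nat.lt_of_lt_of_le hb (Nat.pow_le_pow_right (by omega) (by omega)))
    simp [this]

theorem land_mod_two_pow (a x n : Nat) (ha : a < 2^n) : a &&& (x % 2^n) = a &&& x := by
  apply Nat.eq_of_testBit_eq
  intro i
  rw [Nat.testBit_land, Nat.testBit_land, Nat.testBit_mod_two_pow]
  rcases Nat.lt_or_ge i n with h | h
  · simp [h]
  · have : a.testBit i = false :=
      Nat.testBit_eq_false_of_lt (Nat.lt_of_lt_of_le ha (Nat.pow_le_pow_right (by omega) h))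
    simp [this, h]

theorem parseBin_aux (l : List Char) : ∀ (a : Nat),
    l.foldl (fun a c => 2 * a + (if c = '1' then 1 else 0)) a = a * 2 ^ l.length + parseBin l := by
  induction l with
  | nil => intro a; simp [parseBin]
  | cons c l ih =>
    intro a
    simp only [List.foldl_cons, List.length_cons]
    rw [ih (2 * a + (if c = '1' then 1 else 0))]
    rw [show parseBin (c :: l) = List.foldl (fun a c => 2 * a + (if c = '1' then 1 else 0)) (2 * 0 + (if c = '1' then 1 else 0)) l from rfl, ih]
    ring

theorem parseBin_cons (c : Char) (l : List Char) :
    parseBin (c :: l) = (if c = '1' then 1 else 0) * 2 ^ l.length + parseBin l := by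
  show List.foldl _ (2 * 0 + (if c = '1' then 1 else 0)) l = _
  rw [parseBin_aux]
  ring_nf

theorem parseBin_append (l₁ l₂ : List Char) :
    parseBin (l₁ ++ l₂) = parseBin l₁ * 2 ^ l₂.length + parseBin l₂ := by
  show List.foldl _ 0 (l₁ ++ l₂) = _
  rw [List.foldl_append]
  exact parseBin_aux l₂ _

theorem parseBin_lt (l : List Char) (h : IsBin l) : parseBin l < 2 ^ l.length := by
  induction l with
  | nil => simp [parseBin]
  | cons c l ih =>
    have hl : IsBin l := fun x hx => h x (List.mem_cons_of_mem _ hx)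
    have := ih hl
    rw [parseBin_cons, List.length_cons, pow_succ]
    split_ifs <;> omega

theorem isBin_binChars (n : Nat) : IsBin (binChars n) := by
  fun_induction binChars with
  | case1 n h => intro c hc; simp at hc; subst hc; split_ifs <;> simp
  | case2 n h ih =>
    intro c hc
    rw [List.mem_append] at hc
    rcases hc with hc | hc
    · exact ih c hc
    · simp at hc; subst hc; split_ifs <;> simp

theorem parseBin_binChars (n : Nat) : parseBin (binChars n) = n := by
  fun_induction binChars with
  | case1 n h =>
    interval_cases n <;> simp [parseBin]
  | case2 n h ih =>
    rw [parseBin_append, ih]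
    have : parseBin [if n % 2 = 1 then '1' else '0'] = n % 2 := by
      split_ifs with h1 <;> simp [parseBin] <;> omega
    rw [this]
    simp only [List.length_singleton, pow_one]
    omega

theorem length_binChars_pos (n : Nat) : 1 ≤ (binChars n).length := by
  fun_induction binChars with
  | case1 n h => simp
  | case2 n h ih => simp

theorem binChars_bounds (n : Nat) (h : 1 ≤ n) :
    2 ^ ((binChars n).length - 1) ≤ n ∧ n < 2 ^ (binChars n).length := by
  fun_induction binChars with
  | case1 n hlt => simp; omega
  | case2 n hlt ih =>
    have h2 : 1 ≤ n / 2 := by omega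
    obtain ⟨ih1, ih2⟩ := ih h2
    have hp := length_binChars_pos (n / 2)
    constructor
    · simp only [List.length_append, List.length_singleton]
      have : 2 ^ ((binChars (n/2)).length + 1 - 1) = 2 * 2 ^ ((binChars (n/2)).length - 1) := by
        rw [Nat.add_sub_cancel, ← pow_succ']
        congr 1
        omega
      rw [this]
      omega
    · simp only [List.length_append, List.length_singleton, pow_succ]
      omega

theorem parseBin_drop (l : List Char) (k : Nat) (h : IsBin l) :
    parseBin (List.drop k l) = parseBin l % 2 ^ (l.length - k) := by
  have hsplit : l = List.take k l ++ List.drop k l := (List.take_append_drop k l).symm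
  have hlen : (List.drop k l).length = l.length - k := List.length_drop ..
  have hbin : IsBin (List.drop k l) := fun c hc => h c (List.mem_of_mem_drop hc)
  have key : parseBin l = parseBin (List.take k l) * 2 ^ (l.length - k) + parseBin (List.drop k l) := by
    conv_lhs => rw [hsplit]
    rw [parseBin_append, hlen]
  rw [key, Nat.mul_add_mod', Nat.mod_eq_of_lt (hlen ▸ parseBin_lt _ hbin)]

theorem length_fixLoop (bt : List Char) : ∀ bx : List Char, bt.length = bx.length →
    (fixLoop bt bx).length = bx.length := by
  induction bt with
  | nil => intro bx h; simp [fixLoop]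
  | cons t ts ih =>
    intro bx h
    cases bx with
    | nil => simp at h
    | cons c cs =>
      simp only [fixLoop]
      split_ifs <;> simp_all

theorem div_mul_split (c q Y : Nat) (hc : 0 < c) : ((c * q + Y) / c) * c = c * q + (Y / c) * c := by
  rw [Nat.mul_add_div hc]; ring

theorem fixLoop_value (bt : List Char) : ∀ (bx : List Char) (p : Nat),
    IsBin bt → IsBin bx → bt.length = bx.length →
    2 ^ p ≤ parseBin bt - (parseBin bt &&& parseBin bx) →
    parseBin bt - (parseBin bt &&& parseBin bx) < 2 ^ (p + 1) →
    parseBin (fixLoop bt bx) =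
      ((parseBin bx &&& parseBin bt) / 2 ^ (p + 1)) * 2 ^ (p + 1) + parseBin bx % 2 ^ p := by
  induction bt with
  | nil =>
    intro bx p _ _ _ hD1 _
    simp [parseBin] at hD1
  | cons t ts ih =>
    intro bx p hbt hbx hlen hD1 hD2
    cases bx with
    | nil => simp at hlen
    | cons c cs =>
      have hlen' : ts.length = cs.length := by simpa using hlen
      have hbt' : IsBin ts := fun x hx => hbt x (List.mem_cons_of_mem _ hx)
      have hbx' : IsBin cs := fun x hx => hbx x (List.mem_cons_of_mem _ hx)
      have e0 : (('0':Char) = '1') = False := by decide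
      have e1 : (('1':Char) = '1') = True := by decide
      obtain ⟨L, hLL⟩ : ∃ L, cs.length = L := ⟨_, rfl⟩
      obtain ⟨T', hTv⟩ : ∃ v, parseBin ts = v := ⟨_, rfl⟩
      obtain ⟨X', hXv⟩ : ∃ v, parseBin cs = v := ⟨_, rfl⟩
      have hT'lt : T' < 2 ^ L := by
        rw [← hTv, ← hLL, ← hlen']; exact parseBin_lt ts hbt'
      have hX'lt : X' < 2 ^ L := by
        rw [← hXv, ← hLL]; exact parseBin_lt cs hbx'
      have hand : T' &&& X' ≤ T' := Nat.and_le_left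
      have handX : X' &&& T' ≤ X' := Nat.and_le_left
      have hcomm : X' &&& T' = T' &&& X' := Nat.land_comm ..
      have ihx := ih cs p hbt' hbx' hlen'
      rw [hTv, hXv] at ihx
      rcases hbt t List.mem_cons_self with ht | ht <;>
        rcases hbx c List.mem_cons_self with hc | hc <;> subst ht hc
      -- t='0', c='0'
      · rw [show fixLoop ('0'::ts) ('0'::cs) = '0' :: fixLoop ts cs from by simp [fixLoop]]
        simp only [parseBin_cons] at hD1 hD2 ⊢
        simp only [e0, if_false, Nat.zero_mul, Nat.zero_add, hTv, hXv] at hD1 hD2 ⊢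
        exact ihx hD1 hD2
      -- t='0', c='1'
      · have hsplitT : T' &&& (2 ^ L + X') = T' &&& X' := by
          have := land_split 0 1 T' X' L hT'lt hX'lt
          simpa using this
        have hsplitX : (2 ^ L + X') &&& T' = X' &&& T' := by
          have := land_split 1 0 X' T' L hX'lt hT'lt
          simpa using this
        rw [show fixLoop ('0'::ts) ('1'::cs) = '0' :: fixLoop ts cs from by simp [fixLoop]]
        simp only [parseBin_cons] at hD1 hD2 ⊢
        simp only [e0, if_false, if_true, Nat.zero_mul, Nat.one_mul, Nat.zero_add,
          hTv, hXv, hlen', hLL] at hD1 hD2 ⊢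
        rw [hsplitT] at hD1 hD2
        have hp : p < L := by
          have h1 : 2 ^ p ≤ T' := by omega
          exact (Nat.pow_lt_pow_iff_right (by omega)).mp (Nat.lt_of_le_of_lt h1 hT'lt)
        rw [ihx hD1 hD2, hsplitX]
        congr 1
        rw [show (2:Nat) ^ L = 2 ^ (L - p) * 2 ^ p from by rw [← pow_add]; congr 1; omega]
        rw [Nat.mul_add_mod']
      -- t='1', c='0'  (the break)
      · have hsplitT : (2 ^ L + T') &&& X' = T' &&& X' := by
          have := land_split 1 0 T' X' L hT'lt hX'lt
          simpa using this
        rw [show fixLoop ('1'::ts) ('0'::cs) = '0' :: cs from by simp [fixLoop]]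
        simp only [parseBin_cons] at hD1 hD2 ⊢
        simp only [e0, if_false, if_true, Nat.zero_mul, Nat.one_mul, Nat.zero_add,
          hTv, hXv, hlen', hLL] at hD1 hD2 ⊢
        rw [hsplitT] at hD1 hD2
        have hsplitX : X' &&& (2 ^ L + T') = X' &&& T' := by
          have := land_split 0 1 X' T' L hX'lt hT'lt
          simpa using this
        rw [hsplitX]
        have hpL : p = L := by
          have h1 : (2:Nat) ^ L < 2 ^ (p + 1) := by omega
          have h2 : (2:Nat) ^ p < 2 ^ (L + 1) := by rw [pow_succ]; omega
          have hle1 : L < p + 1 := (Nat.pow_lt_pow_iff_right (a := 2) (by omega)).mp h1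
          have hle2 : p < L + 1 := (Nat.pow_lt_pow_iff_right (a := 2) (by omega)).mp h2
          omega
        have hdiv : (X' &&& T') / 2 ^ (p + 1) = 0 :=
          Nat.div_eq_of_lt (by
            have h3 : X' &&& T' < 2 ^ L := Nat.lt_of_le_of_lt handX hX'lt
            have h4 : (2:Nat) ^ L < 2 ^ (p + 1) := Nat.pow_lt_pow_right (by omega) (by omega)
            omega)
        rw [hdiv, Nat.zero_mul, Nat.zero_add, hpL, Nat.mod_eq_of_lt hX'lt]
      -- t='1', c='1'
      · have hsplitT : (2 ^ L + T') &&& (2 ^ L + X') = 2 ^ L + (T' &&& X') := by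
          have := land_split 1 1 T' X' L hT'lt hX'lt
          simpa using this
        have hsplitX : (2 ^ L + X') &&& (2 ^ L + T') = 2 ^ L + (X' &&& T') := by
          have := land_split 1 1 X' T' L hX'lt hT'lt
          simpa using this
        rw [show fixLoop ('1'::ts) ('1'::cs) = '1' :: fixLoop ts cs from by simp [fixLoop]]
        simp only [parseBin_cons] at hD1 hD2 ⊢
        simp only [if_true, Nat.one_mul, hTv, hXv, hlen', hLL,
          length_fixLoop ts cs hlen'] at hD1 hD2 ⊢
        rw [hsplitT] at hD1 hD2
        have hD1' : 2 ^ p ≤ T' - (T' &&& X') := by omega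
        have hD2' : T' - (T' &&& X') < 2 ^ (p + 1) := by omega
        have hp : p < L := by
          have h1 : 2 ^ p ≤ T' := by omega
          exact (Nat.pow_lt_pow_iff_right (by omega)).mp (Nat.lt_of_le_of_lt h1 hT'lt)
        rw [ihx hD1' hD2', hsplitX]
        have hsplit2L : (2:Nat) ^ L = 2 ^ (p + 1) * 2 ^ (L - p - 1) := by
          rw [← pow_add]; congr 1; omega
        have hdiv : ((2 ^ L + (X' &&& T')) / 2 ^ (p + 1)) * 2 ^ (p + 1)
            = 2 ^ L + ((X' &&& T') / 2 ^ (p + 1)) * 2 ^ (p + 1) := by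
          rw [hsplit2L]
          exact div_mul_split (2 ^ (p + 1)) (2 ^ (L - p - 1)) (X' &&& T') (Nat.two_pow_pos _)
        have hmod : (2 ^ L + X') % 2 ^ p = X' % 2 ^ p := by
          rw [show (2:Nat) ^ L = 2 ^ (L - p) * 2 ^ p from by rw [← pow_add]; congr 1; omega]
          rw [Nat.mul_add_mod']
        rw [hdiv, hmod]
        omega

theorem costA_eq_costB (target x : Int) (ht : 0 < target) : costA target x = costB target x := by
  unfold costA costB
  by_cases h1 : PySem.Int.band x target = target
  · rw [if_pos h1, if_pos h1]
  · rw [if_neg h1, if_neg h1]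
    by_cases h2 : target < x
    · rw [if_neg (by omega : ¬ x ≤ target)]
      have hx0 : (0:Int) ≤ x := by omega
      have ht0 : (0:Int) ≤ target := by omega
      obtain ⟨T, hT⟩ : ∃ T : Nat, target = (T:Int) := ⟨target.toNat, (Int.toNat_of_nonneg ht0).symm⟩
      obtain ⟨X, hX⟩ : ∃ X : Nat, x = (X:Int) := ⟨x.toNat, (Int.toNat_of_nonneg hx0).symm⟩
      have hT1 : 1 ≤ T := by omega
      have hTX : T < X := by omega
      have hbandxt : PySem.Int.band ((X:Nat):Int) ((T:Nat):Int) = ((X &&& T : Nat) : Int) :=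
        (PySem.Int.band_of_nonneg (by positivity) (by positivity)).trans (by simp)
      have hbandtx : PySem.Int.band ((T:Nat):Int) ((X:Nat):Int) = ((T &&& X : Nat) : Int) :=
        (PySem.Int.band_of_nonneg (by positivity) (by positivity)).trans (by simp)
      have hne : T &&& X ≠ T := by
        intro hcontra
        apply h1
        rw [hX, hT, hbandxt, Nat.land_comm, hcontra]
      have hle : T &&& X ≤ T := Nat.and_le_left
      -- D and p
      set D : Nat := T - (T &&& X) with hD
      have hD1 : 1 ≤ D := by omega
      have hdInt : ((T:Nat):Int) - PySem.Int.band ((T:Nat):Int) ((X:Nat):Int) = ((D:Nat) : Int) := by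
        rw [hbandtx, hD]
        push_cast [Nat.cast_sub hle]
        ring
      obtain ⟨p, hp⟩ : ∃ p, PySem.Int.bitLength ((D:Nat):Int) - 1 = p := ⟨_, rfl⟩
      have hbl1 : 1 ≤ PySem.Int.bitLength ((D:Nat):Int) := by
        by_contra hcon
        have h0 : PySem.Int.bitLength ((D:Nat):Int) = 0 := by omega
        have := PySem.Int.lt_two_pow_bitLength ((D:Nat):Int)
        rw [h0] at this
        simp at this
        omega
      have hplow : 2 ^ p ≤ D := by
        have h7 := PySem.Int.two_pow_bitLength_le ((D:Nat):Int) (by exact_mod_cast (by omega : (D:Int) ≠ 0))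
        rw [hp] at h7
        simpa using h7
      have hphigh : D < 2 ^ (p + 1) := by
        have h8 := PySem.Int.lt_two_pow_bitLength ((D:Nat):Int)
        have hpe : PySem.Int.bitLength ((D:Nat):Int) = p + 1 := by omega
        rw [hpe] at h8
        simpa using h8
      -- lengths
      obtain ⟨L, hLdef⟩ : ∃ L, (binChars T).length = L := ⟨_, rfl⟩
      obtain ⟨hTlow, hThigh⟩ := binChars_bounds T hT1
      obtain ⟨hXlow, hXhigh⟩ := binChars_bounds X (by omega)
      rw [hLdef] at hTlow hThigh
      have hL1 : 1 ≤ L := hLdef ▸ length_binChars_pos T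
      have hLlen : L ≤ (binChars X).length := by
        by_contra hcon
        have : (binChars X).length ≤ L - 1 := by omega
        have h5 : (2:Nat) ^ (binChars X).length ≤ 2 ^ (L - 1) := Nat.pow_le_pow_right (by omega) this
        omega
      -- the window value
      have hwindow : parseBin (List.drop ((binChars X).length - L) (binChars X)) = X % 2 ^ L := by
        rw [parseBin_drop _ _ (isBin_binChars X), parseBin_binChars]
        congr 2
        omega
      have hTW : T &&& (X % 2 ^ L) = T &&& X := land_mod_two_pow T X L hThigh
      have hpL : p < L := by
        have h6 : 2 ^ p ≤ T := by omega
        have := Nat.lt_of_le_of_lt h6 hThigh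
        exact (Nat.pow_lt_pow_iff_right (by omega)).mp this
      -- A-side value via fixLoop_value
      rw [hT, hX]
      rw [if_pos (by exact_mod_cast hTX)]
      dsimp only
      simp only [Int.toNat_natCast]
      rw [hdInt, hp]
      rw [hLdef, PySem.List.slice_from_neg_natCast _ _ (hLdef ▸ length_binChars_pos T)]
      have hAval := fixLoop_value (binChars T) (List.drop ((binChars X).length - L) (binChars X)) p
        (isBin_binChars T)
        (fun c hc => isBin_binChars X c (List.mem_of_mem_drop hc))
        (by rw [List.length_drop]; omega)
        (by rw [parseBin_binChars, hwindow, hTW]; omega)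
        (by rw [parseBin_binChars, hwindow, hTW]; omega)
      rw [parseBin_binChars, hwindow] at hAval
      rw [hAval]
      -- B-side
      rw [hbandxt]
      have hcast1 : (((X &&& T : Nat) : Int) >>> (p+1)) <<< (p+1) = (((X &&& T) >>> (p+1)) <<< (p+1) : Nat) := rfl
      have hcast2 : ((1:Int) <<< p) = ((1 <<< p : Nat) : Int) := rfl
      have h2p : (1 <<< p : Nat) = 2 ^ p := by rw [Nat.shiftLeft_eq, Nat.one_mul]
      have hcast3 : (((1 <<< p : Nat) : Int)) - 1 = ((2 ^ p - 1 : Nat) : Int) := by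
        rw [h2p, Nat.cast_sub (Nat.one_le_two_pow)]
        simp
      have hbandlow : PySem.Int.band ((X:Nat):Int) (((2 ^ p - 1 : Nat)) : Int) = ((X &&& (2^p - 1) : Nat) : Int) := by
        rw [PySem.Int.band_of_nonneg (by positivity) (by positivity), Int.toNat_natCast, Int.toNat_natCast]
      rw [hcast3, hcast1, hbandlow, PySem.Int.bor_natCast]
      rw [Nat.and_two_pow_sub_one_eq_mod]
      have hkey : ((X &&& T) >>> (p+1)) <<< (p+1) ||| (X % 2 ^ p)
          = ((X % 2 ^ L &&& T) / 2 ^ (p + 1)) * 2 ^ (p + 1) + X % 2 ^ L % 2 ^ p := by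
        rw [Nat.shiftLeft_eq, Nat.shiftRight_eq_div_pow]
        rw [lor_eq_add_of_lt _ _ _ (Nat.lt_of_lt_of_le (Nat.mod_lt X (Nat.two_pow_pos p))
          (Nat.pow_le_pow_right (by omega) (by omega)))]
        rw [Nat.land_comm (X % 2 ^ L) T, hTW, Nat.land_comm T X]
        rw [Nat.mod_mod_of_dvd X (pow_dvd_pow 2 (by omega : p ≤ L))]
      rw [hkey]
    · dsimp only
      rw [if_neg h2, if_pos (show x ≤ target by omega)]

theorem costsA_eq_map (target : Int) (ht : 0 < target) (nums : List Int) :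
    costsA target nums = nums.map (costB target) := by
  induction nums with
  | nil => rfl
  | cons x xs ih => simp [costsA, ih, costA_eq_costB target x ht]

theorem length_costsA (target : Int) (nums : List Int) :
    (costsA target nums).length = nums.length := by
  induction nums with
  | nil => rfl
  | cons x xs ih => simp [costsA, ih]

theorem target_pos (ans b : Int) (hans : 0 ≤ ans) :
    0 < PySem.Int.bor ans (1 <<< b.toNat) := by
  obtain ⟨A, hA⟩ : ∃ A : Nat, ans = (A:Nat) := ⟨ans.toNat, (Int.toNat_of_nonneg hans).symm⟩
  rw [hA, PySem.Int.bor_natCast]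
  have hbit : (A ||| 1 <<< b.toNat).testBit b.toNat = true := by
    rw [Nat.testBit_lor, Nat.shiftLeft_eq, Nat.one_mul, Nat.testBit_two_pow_self]
    simp
  have hne : A ||| 1 <<< b.toNat ≠ 0 := by
    intro hcon
    rw [hcon, Nat.zero_testBit] at hbit
    exact Bool.false_ne_true hbit
  exact_mod_cast Nat.pos_of_ne_zero hne

-- ===== the selection lemmas: bounded insertion buffer vs take m of the sorted list =====

-- linear ordered insertion: the specification the binary-search insert is proved against
def ordIns (c : Int) : List Int → List Int
  | [] => [c]
  | v :: vs => if c ≤ v then c :: v :: vs else v :: ordIns c vs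

theorem length_ordIns (c : Int) (l : List Int) : (ordIns c l).length = l.length + 1 := by
  induction l with
  | nil => rfl
  | cons v vs ih => simp only [ordIns]; split_ifs <;> simp [ih]

theorem take_cons_take (M : Nat) (a : Int) (l : List Int) :
    List.take M (a :: List.take M l) = List.take M (a :: l) := by
  cases M with
  | zero => simp
  | succ P =>
    simp only [List.take_succ_cons, List.take_take]
    congr 1
    congr 1
    omega

theorem take_ordIns_take (c : Int) : ∀ (s : List Int) (M : Nat),
    List.take M (ordIns c (List.take M s)) = List.take M (ordIns c s) := by
  intro s
  induction s with
  | nil => intro M; simp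
  | cons v vs ih =>
    intro M
    cases M with
    | zero => simp
    | succ N =>
      simp only [List.take_succ_cons, ordIns]
      split_ifs with h
      · rw [List.take_succ_cons, List.take_succ_cons]
        exact congrArg (c :: ·) (take_cons_take N v vs)
      · rw [List.take_succ_cons, List.take_succ_cons]
        exact congrArg (v :: ·) (ih N)

-- the trim step is take, as long as the buffer stays within m
theorem trim_eq_take (m : Int) (hm : 0 ≤ m) (c : Int) (acc : List Int)
    (hlen : acc.length ≤ m.toNat) :
    (if m < ((ordIns c acc).length : Int) then (ordIns c acc).dropLast else ordIns c acc)
      = List.take m.toNat (ordIns c acc) := by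
  have hL := length_ordIns c acc
  by_cases h : m < ((ordIns c acc).length : Int)
  · rw [if_pos h]
    have hEq : acc.length = m.toNat := by omega
    rw [List.dropLast_eq_take, hL, Nat.add_sub_cancel, hEq]
  · rw [if_neg h]
    exact (List.take_of_length_le (by omega)).symm

-- the binary search meets its specification ("first position with best[r] ≥ c") on a sorted buffer
theorem spotLoop_spec (best : List Int) (c : Int) (hp : best.Pairwise (· ≤ ·)) :
    ∀ (n lo hi : Nat), hi - lo ≤ n → lo ≤ hi → hi ≤ best.length →
      (∀ j (hj : j < best.length), j < lo → best[j] < c) →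
      (∀ j (hj : j < best.length), hi ≤ j → ¬ best[j] < c) →
      spotLoop best c lo hi ≤ best.length ∧
      (∀ j (hj : j < best.length), j < spotLoop best c lo hi → best[j] < c) ∧
      (∀ (hr : spotLoop best c lo hi < best.length), ¬ best[spotLoop best c lo hi] < c) := by
  have hmono : ∀ (i j : Nat) (hi : i < best.length) (hj : j < best.length),
      i ≤ j → best[i] ≤ best[j] := by
    intro i j hi hj hij
    rcases Nat.lt_or_ge i j with h | h
    · exact List.pairwise_iff_getElem.mp hp i j hi hj h
    · have : i = j := by omega
      subst this; exact le_refl _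
  intro n
  induction n with
  | zero =>
    intro lo hi hn hlh hhi h1 h2
    rw [spotLoop, if_neg (by omega : ¬ lo < hi)]
    refine ⟨by omega, fun j hj hjlo => h1 j hj hjlo, fun hr => h2 lo hr (by omega)⟩
  | succ n ih =>
    intro lo hi hn hlh hhi h1 h2
    rw [spotLoop]
    by_cases hlt : lo < hi
    · rw [if_pos hlt]
      dsimp only
      have hmidlt : (lo + hi) / 2 < best.length := by omega
      rw [List.getD_eq_getElem best 0 hmidlt]
      by_cases hc : best[(lo + hi) / 2] < c
      · rw [if_pos hc]
        refine ih ((lo + hi) / 2 + 1) hi (by omega) (by omega) hhi ?_ h2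
        intro j hj hjlt
        rcases Nat.lt_or_ge j lo with h | h
        · exact h1 j hj h
        · exact lt_of_le_of_lt (hmono j ((lo + hi) / 2) hj hmidlt (by omega)) hc
      · rw [if_neg hc]
        refine ih lo ((lo + hi) / 2) (by omega) (by omega) (by omega) h1 ?_
        intro j hj hjge
        have := hmono ((lo + hi) / 2) j hmidlt hj hjge
        omega
    · rw [if_neg hlt]
      refine ⟨by omega, fun j hj hjlo => h1 j hj hjlo, fun hr => h2 lo hr (by omega)⟩

-- inserting at the found position is linear ordered insertion
theorem insertIdx_eq_ordIns (c : Int) : ∀ (best : List Int) (r : Nat),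
    r ≤ best.length →
    (∀ j (hj : j < best.length), j < r → best[j] < c) →
    (∀ (hr : r < best.length), ¬ best[r] < c) →
    best.insertIdx r c = ordIns c best := by
  intro best
  induction best with
  | nil =>
    intro r hr _ _
    have : r = 0 := by simpa using hr
    subst this
    simp [ordIns]
  | cons v vs ih =>
    intro r hr h1 h2
    cases r with
    | zero =>
      have hv : ¬ v < c := h2 (by simp)
      simp [ordIns, List.insertIdx_zero, if_pos (by omega : c ≤ v)]
    | succ r' =>
      have hv : v < c := h1 0 (by simp) (by omega)
      rw [List.insertIdx_succ_cons]
      rw [show ordIns c (v :: vs) = v :: ordIns c vs from by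
        simp [ordIns, if_neg (by omega : ¬ c ≤ v)]]
      refine congrArg (v :: ·) (ih r' (by simpa using hr) ?_ ?_)
      · intro j hj hjr
        have := h1 (j + 1) (by simpa using hj) (by omega)
        simpa using this
      · intro hrlt
        have := h2 (by simpa using hrlt)
        simpa using this

theorem spot_insert_eq_ordIns (best : List Int) (c : Int) (hp : best.Pairwise (· ≤ ·)) :
    best.insertIdx (spotLoop best c 0 best.length) c = ordIns c best := by
  obtain ⟨hle, hlo, hhi⟩ := spotLoop_spec best c hp best.length 0 best.length (by omega)
    (by omega) (le_refl _) (by omega) (by omega)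
  exact insertIdx_eq_ordIns c best _ hle hlo hhi

theorem getLastD_mem (l : List Int) (d : Int) (h : l ≠ []) : l.getLastD d ∈ l := by
  induction l generalizing d with
  | nil => exact absurd rfl h
  | cons a t ih =>
    rw [List.getLastD_cons]
    cases t with
    | nil => simp
    | cons b t' => exact List.mem_cons_of_mem a (ih a (by simp))

theorem all_le_getLastD : ∀ (l : List Int), l.Pairwise (· ≤ ·) → ∀ (d : Int),
    ∀ u ∈ l, u ≤ l.getLastD d := by
  intro l
  induction l with
  | nil => intro _ d u hu; simp at hu
  | cons a t ih =>
    intro hp d u hu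
    rcases List.pairwise_cons.mp hp with ⟨ha, ht⟩
    rw [List.getLastD_cons]
    rcases List.mem_cons.mp hu with heq | hu
    · cases t with
      | nil => simp [heq]
      | cons b t' =>
        rw [heq]
        exact ha _ (getLastD_mem (b :: t') a (by simp))
    · exact ih ht a u hu

theorem take_cons_of_all_eq (c : Int) : ∀ (l : List Int), (∀ u ∈ l, u = c) →
    List.take l.length (c :: l) = l := by
  intro l
  induction l with
  | nil => simp
  | cons u t ih =>
    intro h
    have hu : u = c := h u List.mem_cons_self
    rw [List.length_cons, List.take_succ_cons]
    rw [hu]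
    exact congrArg (c :: ·) (ih fun v hv => h v (List.mem_cons_of_mem u hv))

-- a full buffer whose elements are all ≤ c is unchanged by inserting c and re-trimming
theorem take_ordIns_of_all_le (c : Int) : ∀ (l : List Int), l.Pairwise (· ≤ ·) →
    (∀ u ∈ l, u ≤ c) → List.take l.length (ordIns c l) = l := by
  intro l
  induction l with
  | nil => simp [ordIns]
  | cons v vs ih =>
    intro hp hle
    rcases List.pairwise_cons.mp hp with ⟨hv, hvs⟩
    simp only [ordIns]
    split_ifs with h
    · have hall : ∀ u ∈ v :: vs, u = c := by
        intro u hu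
        have h1 := hle u hu
        rcases List.mem_cons.mp hu with heq | hmem
        · omega
        · have h2 := hv u hmem
          omega
      exact take_cons_of_all_eq c (v :: vs) hall
    · rw [List.length_cons, List.take_succ_cons]
      exact congrArg (v :: ·) (ih hvs fun u hu => hle u (List.mem_cons_of_mem v hu))

theorem perm_ordIns (c : Int) (l : List Int) : (ordIns c l).Perm (c :: l) := by
  induction l with
  | nil => simp [ordIns]
  | cons v vs ih =>
    simp only [ordIns]
    split_ifs with h
    · exact List.Perm.refl _
    · exact (ih.cons v).trans (List.Perm.swap c v vs)

theorem perm_foldl_ordIns : ∀ (l s : List Int),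
    (l.foldl (fun acc c => ordIns c acc) s).Perm (l ++ s) := by
  intro l
  induction l with
  | nil => intro s; simp
  | cons c cs ih =>
    intro s
    simp only [List.foldl_cons]
    refine (ih (ordIns c s)).trans ?_
    exact ((perm_ordIns c s).append_left cs).trans List.perm_middle

theorem mem_ordIns {x c : Int} {l : List Int} (h : x ∈ ordIns c l) : x = c ∨ x ∈ l := by
  have := (perm_ordIns c l).mem_iff.mp h
  simpa using this

theorem pairwise_ordIns (c : Int) (l : List Int) (h : l.Pairwise (· ≤ ·)) :
    (ordIns c l).Pairwise (· ≤ ·) := by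
  induction l with
  | nil => simp [ordIns]
  | cons v vs ih =>
    rcases List.pairwise_cons.mp h with ⟨hv, hvs⟩
    simp only [ordIns]
    split_ifs with hcv
    · refine List.pairwise_cons.mpr ⟨?_, h⟩
      intro y hy
      rcases List.mem_cons.mp hy with rfl | hy
      · exact hcv
      · exact le_trans hcv (hv y hy)
    · refine List.pairwise_cons.mpr ⟨?_, ih hvs⟩
      intro y hy
      rcases mem_ordIns hy with rfl | hy
      · omega
      · exact hv y hy

theorem pairwise_foldl_ordIns : ∀ (l s : List Int), s.Pairwise (· ≤ ·) →
    (l.foldl (fun acc c => ordIns c acc) s).Pairwise (· ≤ ·) := by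
  intro l
  induction l with
  | nil => intro s hs; exact hs
  | cons c cs ih =>
    intro s hs
    exact ih (ordIns c s) (pairwise_ordIns c s hs)

-- the buffer loop body as a function of the cost, over a take-m accumulator
theorem foldl_buffer_eq_take_foldl (m : Int) (hm : 0 ≤ m) :
    ∀ (l s : List Int), s.Pairwise (· ≤ ·) →
      l.foldl (fun acc c =>
          if (acc.length : Int) = m ∧ acc ≠ [] ∧ acc.getLastD 0 ≤ c then acc
          else
            let t := acc.insertIdx (spotLoop acc c 0 acc.length) c
            if m < (t.length : Int) then t.dropLast else t) (List.take m.toNat s)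
        = List.take m.toNat (l.foldl (fun acc c => ordIns c acc) s) := by
  intro l
  induction l with
  | nil => intro s _; rfl
  | cons c cs ih =>
    intro s hs
    simp only [List.foldl_cons]
    have hpacc : (List.take m.toNat s).Pairwise (· ≤ ·) :=
      List.Pairwise.sublist (List.take_sublist m.toNat s) hs
    rw [spot_insert_eq_ordIns _ c hpacc]
    by_cases hskip : ((List.take m.toNat s).length : Int) = m ∧ List.take m.toNat s ≠ [] ∧
        (List.take m.toNat s).getLastD 0 ≤ c
    · rw [if_pos hskip]
      obtain ⟨hlen, _, hlast⟩ := hskip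
      have hM : (List.take m.toNat s).length = m.toNat := by omega
      have hall : ∀ u ∈ List.take m.toNat s, u ≤ c :=
        fun u hu => le_trans (all_le_getLastD _ hpacc 0 u hu) hlast
      have hacc : List.take m.toNat s = List.take m.toNat (ordIns c s) := by
        have e2 := take_ordIns_of_all_le c _ hpacc hall
        rw [hM] at e2
        rw [← e2, take_ordIns_take c s m.toNat]
      rw [hacc]
      exact ih (ordIns c s) (pairwise_ordIns c s hs)
    · rw [if_neg hskip]
      rw [trim_eq_take m hm c _ (by simp)]
      rw [take_ordIns_take c s m.toNat]
      exact ih (ordIns c s) (pairwise_ordIns c s hs)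

-- the buffer fold computes take m of Python's sorted list
theorem buffer_eq_take_sorted (m : Int) (hm : 0 ≤ m) (costs : List Int) :
    costs.foldl (fun acc c =>
        if (acc.length : Int) = m ∧ acc ≠ [] ∧ acc.getLastD 0 ≤ c then acc
        else
          let t := acc.insertIdx (spotLoop acc c 0 acc.length) c
          if m < (t.length : Int) then t.dropLast else t) []
      = List.take m.toNat (PySem.List.sorted costs (fun c => c) false) := by
  have hs : PySem.List.sorted costs (fun c => c) false
      = costs.foldl (fun acc c => ordIns c acc) [] := by
    apply PySem.List.sorted_id_eq_of_perm_of_pairwise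
    · simpa using perm_foldl_ordIns costs []
    · exact pairwise_foldl_ordIns costs [] (by simp)
  calc costs.foldl _ [] = costs.foldl _ (List.take m.toNat []) := by simp
    _ = List.take m.toNat (costs.foldl (fun acc c => ordIns c acc) []) :=
        foldl_buffer_eq_take_foldl m hm costs [] (by simp)
    _ = _ := by rw [hs]

theorem innerB_foldl_eq (target m : Int) (nums : List Int) :
    nums.foldl (innerB target m) []
      = (nums.map (costB target)).foldl (fun acc c =>
          if (acc.length : Int) = m ∧ acc ≠ [] ∧ acc.getLastD 0 ≤ c then acc
          else
            let t := acc.insertIdx (spotLoop acc c 0 acc.length) c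
            if m < (t.length : Int) then t.dropLast else t) [] := by
  rw [List.foldl_map]
  rfl

theorem stepA_eq_stepB (nums : List Int) (k m ans b : Int) (hans : 0 ≤ ans)
    (hm : 0 ≤ m) (hmn : m ≤ (nums.length : Int)) :
    stepA nums k m ans b = stepB nums k m ans b := by
  unfold stepA stepB
  dsimp only
  have ht := target_pos ans b hans
  rw [if_pos (by rw [length_costsA]; omega)]
  rw [costsA_eq_map _ ht, PySem.List.slice_to _ hm]
  rw [innerB_foldl_eq, buffer_eq_take_sorted m hm]

theorem stepB_nonneg (nums : List Int) (k m ans b : Int) (hans : 0 ≤ ans) :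
    0 ≤ stepB nums k m ans b := by
  unfold stepB
  dsimp only
  have := target_pos ans b hans
  split_ifs <;> omega

theorem foldl_step_eq (nums : List Int) (k m : Int) (hm : 0 ≤ m) (hmn : m ≤ (nums.length : Int)) :
    ∀ (l : List Int) (ans : Int), 0 ≤ ans →
      l.foldl (stepA nums k m) ans = l.foldl (stepB nums k m) ans := by
  intro l
  induction l with
  | nil => intro ans _; rfl
  | cons b bs ih =>
    intro ans hans
    simp only [List.foldl_cons]
    rw [stepA_eq_stepB nums k m ans b hans hm hmn]
    exact ih _ (stepB_nonneg nums k m ans b hans)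

theorem stepA_skip (nums : List Int) (k m ans b : Int) (h : (nums.length : Int) < m) :
    stepA nums k m ans b = ans := by
  unfold stepA
  dsimp only
  rw [if_neg (by rw [length_costsA]; omega)]

theorem foldl_stepA_skip (nums : List Int) (k m : Int) (h : (nums.length : Int) < m) :
    ∀ (l : List Int) (ans : Int), l.foldl (stepA nums k m) ans = ans := by
  intro l
  induction l with
  | nil => intro ans; rfl
  | cons b bs ih =>
    intro ans
    simp only [List.foldl_cons, stepA_skip nums k m ans b h]
    exact ih ans

-- ===== VERDICT (by name: the statement is the Claim_ definition above) =====
theorem maximumAND_spec : Claim_equal_maximumAND := by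
  intro nums k m _ hm
  unfold Spec_maximumAND maximumAND maximumAND_alt
  by_cases h : (nums.length : Int) < m
  · rw [if_pos h, foldl_stepA_skip nums k m h]
  · rw [if_neg h]
    exact foldl_step_eq nums k m hm (by omega) _ 0 le_rfl
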